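-- pv_equiv track=rewrite | github.com/Alok1721/CompetitiveCoding_DSA | OA/netcore/2.py | find_maximum_remainder
-- ===== SOURCE A (Python) =====
-- def find_maximum_remainder(N, A, k):
--     evens = [x for x in A if x % 2 == 0]
--     odds = [x for x in A if x % 2 == 1]
--
--     max_rem = 0
--     for e in evens:
--         for o in odds:
--             rem = (e + o) % k
--             if rem > max_rem:
--                 max_rem = rem
--     return max_rem
-- ===== SOURCE B (Python) =====
-- def find_maximum_remainder(N, A, k):
--     if k < 0:
--         # every remainder modulo a negative k is <= 0, and the running max starts at 0
--         return 0
--     ev = sorted({x % k for x in A if x % 2 == 0})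
--     od = sorted({x % k for x in A if x % 2 == 1})
--     if not od:
--         return 0
--     mo = od[-1]
--     best = 0
--     j = len(od)  # pointer: od[j:] are the odd residues known to exceed the current threshold
--     for e in ev:
--         t = k - 1 - e
--         while j > 0 and od[j - 1] > t:
--             j -= 1
--         cand = e + od[j - 1] if j > 0 else (e + mo) % k
--         if cand > best:
--             best = cand
--     return best
-- ===== Notes on version B (the rewrite author's own statement) =====
-- stated objective: faster
-- what changed: B replaces the nested scan over all even/odd pairs by reducing to the distinct residues mod k, sorting them, and sweeping even residues ascending with a descending two-pointer over the sorted odd residues to find each even residue's best odd partner.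
-- outside the precondition, e.g. on find_maximum_remainder(1, [2], 0): A returns 0, B raises ZeroDivisionError
import Mathlib
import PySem

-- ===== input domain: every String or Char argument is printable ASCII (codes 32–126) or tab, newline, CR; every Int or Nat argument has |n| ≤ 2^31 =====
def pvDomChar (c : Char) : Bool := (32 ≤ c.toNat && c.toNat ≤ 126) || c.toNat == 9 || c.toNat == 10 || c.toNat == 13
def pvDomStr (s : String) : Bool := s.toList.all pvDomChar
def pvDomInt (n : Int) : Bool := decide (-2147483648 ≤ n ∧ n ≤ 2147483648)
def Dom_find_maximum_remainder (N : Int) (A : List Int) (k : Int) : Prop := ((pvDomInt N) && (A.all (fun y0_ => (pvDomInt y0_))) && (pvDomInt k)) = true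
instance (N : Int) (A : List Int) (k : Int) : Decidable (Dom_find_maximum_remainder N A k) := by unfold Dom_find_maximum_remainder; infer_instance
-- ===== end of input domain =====

-- B replaces A's nested scan over all even/odd pairs by sorted distinct residues mod k
-- with a descending two-pointer over the odd residues (objective: faster, O(n log n) vs O(E*O)).


-- ===== PORT A =====
def find_maximum_remainder (N : Int) (A : List Int) (k : Int) : Int :=
  let evens := A.filter (fun x => PySem.Int.mod x 2 == 0)
  let odds := A.filter (fun x => PySem.Int.mod x 2 == 1)
  evens.foldl (fun max_rem e =>
    odds.foldl (fun max_rem o =>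
      let rem := PySem.Int.mod (e + o) k
      if rem > max_rem then rem else max_rem) max_rem) 0

-- ===== PORT B =====
-- Source B's inner 'while j > 0 and od[j-1] > t: j -= 1' loop, recursing on the pointer j
def pvDropGt (od : List Int) (t : Int) : Nat → Nat
  | 0 => 0
  | j + 1 => if PySem.List.pyGetD od (j : Int) 0 > t then pvDropGt od t j else j + 1

def find_maximum_remainder_alt (N : Int) (A : List Int) (k : Int) : Int :=
  if k < 0 then 0   -- every remainder mod a negative k is ≤ 0, the running max would stay 0
  else
    let ev := PySem.List.sorted (PySem.Set.ofList ((A.filter (fun x => PySem.Int.mod x 2 == 0)).map (fun x => PySem.Int.mod x k))) (fun x => x)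
    let od := PySem.List.sorted (PySem.Set.ofList ((A.filter (fun x => PySem.Int.mod x 2 == 1)).map (fun x => PySem.Int.mod x k))) (fun x => x)
    match od.getLast? with   -- Source B: 'if not od: return 0' then 'mo = od[-1]'
    | none => 0
    | some mo =>
      (ev.foldl (fun (s : Int × Nat) e =>
          let j := pvDropGt od (k - 1 - e) s.2
          let cand := if 0 < j then e + PySem.List.pyGetD od ((j : Int) - 1) 0 else PySem.Int.mod (e + mo) k
          (if cand > s.1 then cand else s.1, j)) (0, od.length)).1

-- ===== PRECONDITION & SPEC =====
-- Pre_ excludes exactly k = 0: there Python A raises ZeroDivisionError whenever both an even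
-- and an odd element are present, and B's residue reduction raises on any element at all.
def Pre_find_maximum_remainder (N : Int) (A : List Int) (k : Int) : Prop := k ≠ 0
instance (N : Int) (A : List Int) (k : Int) : Decidable (Pre_find_maximum_remainder N A k) := by unfold Pre_find_maximum_remainder; infer_instance
def pvWitness_find_maximum_remainder : Int × List Int × Int := (4, [1, 2, 3, 4], 5)

def Spec_find_maximum_remainder (N : Int) (A : List Int) (k : Int) (out : Int) : Prop := out = find_maximum_remainder_alt N A k
instance (N : Int) (A : List Int) (k : Int) (out : Int) : Decidable (Spec_find_maximum_remainder N A k out) := by unfold Spec_find_maximum_remainder; infer_instance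

-- ===== CLAIM (what is proved, stated in full; the proofs are below) =====
def Claim_equal_find_maximum_remainder : Prop := ∀ (N : Int) (A : List Int) (k : Int), Dom_find_maximum_remainder N A k → Pre_find_maximum_remainder N A k → Spec_find_maximum_remainder N A k (find_maximum_remainder N A k)

-- ===== LEMMAS AND PROOFS =====

-- the list of all remainders A ranges over
def pvPairs (A : List Int) (k : Int) : List Int :=
  (A.filter (fun x => PySem.Int.mod x 2 == 0)).flatMap
    (fun e => (A.filter (fun x => PySem.Int.mod x 2 == 1)).map (fun o => PySem.Int.mod (e + o) k))


-- sorted distinct residues of the even / odd elements (the 'ev'/'od' lets of the B port)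
def pvEv (A : List Int) (k : Int) : List Int :=
  PySem.List.sorted (PySem.Set.ofList ((A.filter (fun x => PySem.Int.mod x 2 == 0)).map (fun x => PySem.Int.mod x k))) (fun x => x)
def pvOd (A : List Int) (k : Int) : List Int :=
  PySem.List.sorted (PySem.Set.ofList ((A.filter (fun x => PySem.Int.mod x 2 == 1)).map (fun x => PySem.Int.mod x k))) (fun x => x)

-- the per-even-residue candidate that the pointer sweep computes
def pvCand (od : List Int) (k mo e : Int) : Int :=
  let i := PySem.List.bisectRight od (k - 1 - e)
  if 0 < i then e + od.getD (i - 1) 0 else PySem.Int.mod (e + mo) k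

lemma pv_if_max (m r : Int) : (if r > m then r else m) = max m r := by
  rw [max_def]; split_ifs <;> omega

lemma pv_fm_init (l : List Int) (a : Int) : a ≤ l.foldl max a := by
  induction l generalizing a with
  | nil => simp
  | cons x t ih => exact le_trans (le_max_left a x) (ih _)

lemma pv_fm_mem {l : List Int} {x : Int} (h : x ∈ l) (a : Int) : x ≤ l.foldl max a := by
  induction l generalizing a with
  | nil => cases h
  | cons y t ih =>
    rcases List.mem_cons.mp h with rfl | hx
    · exact le_trans (le_max_right a x) (pv_fm_init t _)
    · exact ih hx _

lemma pv_fm_cases (l : List Int) (a : Int) : l.foldl max a = a ∨ l.foldl max a ∈ l := by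
  induction l generalizing a with
  | nil => left; rfl
  | cons x t ih =>
    rcases ih (max a x) with h | h
    · rw [List.foldl_cons, h]
      rcases max_choice a x with h' | h'
      · left; exact h'
      · right; rw [h']; exact List.mem_cons_self
    · right; exact List.mem_cons_of_mem _ h

lemma pv_fm_eq (l1 l2 : List Int) (h1 : ∀ x ∈ l1, x ≤ l2.foldl max 0) (h2 : ∀ x ∈ l2, x ≤ l1.foldl max 0) :
    l1.foldl max 0 = l2.foldl max 0 := by
  apply le_antisymm
  · rcases pv_fm_cases l1 0 with h | h
    · rw [h]; exact pv_fm_init l2 0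
    · exact h1 _ h
  · rcases pv_fm_cases l2 0 with h | h
    · rw [h]; exact pv_fm_init l1 0
    · exact h2 _ h

lemma pv_foldl_flat (l : List Int) (g : Int → List Int) (a : Int) :
    l.foldl (fun m e => (g e).foldl max m) a = (l.flatMap g).foldl max a := by
  induction l generalizing a with
  | nil => rfl
  | cons x t ih => simp [List.flatMap_cons, List.foldl_append, ih]

-- A computes the running max (from 0) of the list of all pair remainders
lemma pvA_eq (N : Int) (A : List Int) (k : Int) :
    find_maximum_remainder N A k = (pvPairs A k).foldl max 0 := by
  unfold find_maximum_remainder pvPairs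
  rw [← pv_foldl_flat]
  simp only [pv_if_max, List.foldl_map]

lemma pv_mem_pvEv {A : List Int} {k x : Int} :
    x ∈ pvEv A k ↔ ∃ a ∈ A, PySem.Int.mod a 2 = 0 ∧ x = PySem.Int.mod a k := by
  unfold pvEv
  rw [PySem.List.mem_sorted, PySem.Set.mem_ofList]
  simp only [List.mem_map, List.mem_filter, beq_iff_eq]
  constructor
  · rintro ⟨a, ⟨ha, he⟩, rfl⟩; exact ⟨a, ha, he, rfl⟩
  · rintro ⟨a, ha, he, rfl⟩; exact ⟨a, ⟨ha, he⟩, rfl⟩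

lemma pv_mem_pvOd {A : List Int} {k x : Int} :
    x ∈ pvOd A k ↔ ∃ a ∈ A, PySem.Int.mod a 2 = 1 ∧ x = PySem.Int.mod a k := by
  unfold pvOd
  rw [PySem.List.mem_sorted, PySem.Set.mem_ofList]
  simp only [List.mem_map, List.mem_filter, beq_iff_eq]
  constructor
  · rintro ⟨a, ⟨ha, he⟩, rfl⟩; exact ⟨a, ha, he, rfl⟩
  · rintro ⟨a, ha, he, rfl⟩; exact ⟨a, ⟨ha, he⟩, rfl⟩

lemma pv_pvEv_sorted (A : List Int) (k : Int) : (pvEv A k).Pairwise (· ≤ ·) :=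
  (PySem.List.sorted_ofList_pairwise_lt _).imp le_of_lt

lemma pv_pvOd_sorted (A : List Int) (k : Int) : (pvOd A k).Pairwise (· ≤ ·) :=
  (PySem.List.sorted_ofList_pairwise_lt _).imp le_of_lt

-- the last element of a ≤-sorted list bounds every member
lemma pv_getLast_ge {l : List Int} {m : Int} (hs : l.Pairwise (· ≤ ·)) (h : l.getLast? = some m) :
    ∀ x ∈ l, x ≤ m := by
  induction l with
  | nil => simp at h
  | cons a t ih =>
    intro x hx
    cases t with
    | nil =>
      simp at h hx; omega
    | cons b t' =>
      rw [List.getLast?_cons_cons] at h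
      rcases List.mem_cons.mp hx with rfl | hx'
      · have hab : x ≤ b := (List.pairwise_cons.mp hs).1 b List.mem_cons_self
        exact le_trans hab (ih (List.pairwise_cons.mp hs).2 h b List.mem_cons_self)
      · exact ih (List.pairwise_cons.mp hs).2 h x hx'

-- membership in pvPairs
lemma pv_mem_pvPairs {A : List Int} {k x : Int} :
    x ∈ pvPairs A k ↔ ∃ a ∈ A, PySem.Int.mod a 2 = 0 ∧ ∃ b ∈ A, PySem.Int.mod b 2 = 1 ∧
      x = PySem.Int.mod (a + b) k := by
  unfold pvPairs
  simp only [List.mem_flatMap, List.mem_map, List.mem_filter, beq_iff_eq]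
  constructor
  · rintro ⟨a, ⟨ha, he⟩, b, ⟨hb, hob⟩, rfl⟩; exact ⟨a, ha, he, b, hb, hob, rfl⟩
  · rintro ⟨a, ha, he, b, hb, hob, rfl⟩; exact ⟨a, ⟨ha, he⟩, b, ⟨hb, hob⟩, rfl⟩

-- the pointer loop lands exactly on bisect_right, given that everything at or above j is > t
lemma pvDropGt_spec (od : List Int) (t : Int) (hs : od.Pairwise (· ≤ ·)) :
    ∀ j, j ≤ od.length → (∀ idx (h : idx < od.length), j ≤ idx → t < od[idx]) →
      pvDropGt od t j = PySem.List.bisectRight od t := by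
  obtain ⟨hble, hlo, hhi⟩ := PySem.List.bisectRight_spec od t hs
  intro j
  induction j with
  | zero =>
    intro _ hup
    by_contra hne
    have hpos : 0 < PySem.List.bisectRight od t := by
      cases Nat.eq_zero_or_pos (PySem.List.bisectRight od t) with
      | inl h => exact absurd h.symm (by simpa [pvDropGt] using hne)
      | inr h => exact h
    have h0 : (0:Nat) < od.length := lt_of_lt_of_le hpos hble
    exact absurd (hlo 0 h0 hpos) (not_le.mpr (hup 0 h0 (Nat.zero_le _)))
  | succ j ih =>
    intro hj hup
    have hjlen : j < od.length := hj
    have hgetd : PySem.List.pyGetD od (j : Int) 0 = od[j] := by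
      rw [PySem.List.pyGetD_natCast, List.getD_eq_getElem od 0 hjlen]
    unfold pvDropGt
    rw [hgetd]
    by_cases hgt : od[j] > t
    · rw [if_pos hgt]
      apply ih (Nat.le_of_lt hjlen)
      intro idx hidx hjidx
      rcases Nat.eq_or_lt_of_le hjidx with rfl | h
      · exact hgt
      · exact hup idx hidx h
    · rw [if_neg hgt]
      rw [not_lt] at hgt
      -- od[j] ≤ t pins bisectRight to exactly j+1
      by_contra hne
      rcases Nat.lt_or_ge (PySem.List.bisectRight od t) (j+1) with hlt | hge
      · have : PySem.List.bisectRight od t ≤ j := Nat.lt_succ_iff.mp hlt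
        exact absurd (hhi j hjlen this) (not_lt.mpr hgt)
      · have hgt' : j + 1 < PySem.List.bisectRight od t := lt_of_le_of_ne hge hne
        have hlen : j + 1 < od.length := lt_of_lt_of_le hgt' hble
        exact absurd (hlo (j+1) hlen hgt') (not_le.mpr (hup (j+1) hlen (Nat.le_refl _)))

-- the sweep computes the running max of the per-residue candidates
lemma pvB_fold (od : List Int) (k mo : Int) (hs : od.Pairwise (· ≤ ·)) :
    ∀ (ev : List Int), ev.Pairwise (· ≤ ·) → ∀ (j : Nat) (best : Int), j ≤ od.length →
      (∀ idx (h : idx < od.length), j ≤ idx → ∀ e ∈ ev, k - 1 - e < od[idx]) →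
      (ev.foldl (fun (s : Int × Nat) e =>
          let j := pvDropGt od (k - 1 - e) s.2
          let cand := if 0 < j then e + PySem.List.pyGetD od ((j : Int) - 1) 0 else PySem.Int.mod (e + mo) k
          (if cand > s.1 then cand else s.1, j)) (best, j)).1
      = ev.foldl (fun m e => max m (pvCand od k mo e)) best := by
  intro ev
  induction ev with
  | nil => intro _ j best _ _; rfl
  | cons e t ih =>
    intro hp j best hj hup
    obtain ⟨hhead, htail⟩ := List.pairwise_cons.mp hp
    have hbis := pvDropGt_spec od (k - 1 - e) hs j hj (fun idx h hge => hup idx h hge e List.mem_cons_self)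
    obtain ⟨hble, hlo, hhi⟩ := PySem.List.bisectRight_spec od (k - 1 - e) hs
    simp only [List.foldl_cons]
    have hcand : (if 0 < pvDropGt od (k - 1 - e) j then
          e + PySem.List.pyGetD od ((pvDropGt od (k - 1 - e) j : Int) - 1) 0
        else PySem.Int.mod (e + mo) k) = pvCand od k mo e := by
      rw [hbis, pvCand]
      by_cases hpos : 0 < PySem.List.bisectRight od (k - 1 - e)
      · rw [if_pos hpos, if_pos hpos]
        have : ((PySem.List.bisectRight od (k - 1 - e) : Int) - 1) = ((PySem.List.bisectRight od (k - 1 - e) - 1 : Nat) : Int) := by omega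
        rw [this, PySem.List.pyGetD_natCast]
      · rw [if_neg hpos, if_neg hpos]
    rw [hcand, hbis, pv_if_max]
    apply ih htail _ _ hble
    intro idx hidx hge e' he'
    have h1 : k - 1 - e < od[idx] := hhi idx hidx hge
    have h2 : e ≤ e' := hhead e' he'
    omega

-- evaluate B (as a definition unfolding) to the sweep form
lemma pvB_eq (N : Int) (A : List Int) (k : Int) (hk : ¬ k < 0) :
    find_maximum_remainder_alt N A k =
      (match (pvOd A k).getLast? with
       | none => 0
       | some mo =>
        ((pvEv A k).foldl (fun (s : Int × Nat) e =>
            let j := pvDropGt (pvOd A k) (k - 1 - e) s.2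
            let cand := if 0 < j then e + PySem.List.pyGetD (pvOd A k) ((j : Int) - 1) 0 else PySem.Int.mod (e + mo) k
            (if cand > s.1 then cand else s.1, j)) (0, (pvOd A k).length)).1) := by
  unfold find_maximum_remainder_alt pvEv pvOd
  rw [if_neg hk]

lemma pv_fm_le {l : List Int} {a : Int} (h : ∀ x ∈ l, x ≤ a) : l.foldl max a = a := by
  induction l with
  | nil => rfl
  | cons x t ih =>
    rw [List.foldl_cons, max_eq_left (h x List.mem_cons_self)]
    exact ih (fun y hy => h y (List.mem_cons_of_mem _ hy))

lemma pv_mod_add (a b k : Int) (hk : 0 < k) :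
    PySem.Int.mod (a + b) k = PySem.Int.mod (PySem.Int.mod a k + PySem.Int.mod b k) k := by
  rw [PySem.Int.mod_eq_emod_of_pos hk, PySem.Int.mod_eq_emod_of_pos hk,
      PySem.Int.mod_eq_emod_of_pos hk, PySem.Int.mod_eq_emod_of_pos hk, Int.add_emod]

lemma pv_mod_wrap {x k : Int} (hk : 0 < k) (h1 : k ≤ x) (h2 : x < 2 * k) :
    PySem.Int.mod x k = x - k := by
  rw [PySem.Int.mod_eq_emod_of_pos hk, ← Int.sub_emod_right x k]
  exact Int.emod_eq_of_lt (by omega) (by omega)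

lemma pv_mod_id {x k : Int} (hk : 0 < k) (h1 : 0 ≤ x) (h2 : x < k) :
    PySem.Int.mod x k = x := by
  rw [PySem.Int.mod_eq_emod_of_pos hk]
  exact Int.emod_eq_of_lt h1 h2

-- the core per-residue bound: every pair remainder is dominated by the candidate of its even residue
lemma pvCand_ge (od : List Int) (k mo e o : Int) (hs : od.Pairwise (· ≤ ·))
    (hk : 0 < k) (he0 : 0 ≤ e) (hek : e < k)
    (hob : ∀ x ∈ od, 0 ≤ x ∧ x < k) (ho : o ∈ od) (hmo : od.getLast? = some mo) :
    PySem.Int.mod (e + o) k ≤ pvCand od k mo e := by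
  obtain ⟨hble, hlo, hhi⟩ := PySem.List.bisectRight_spec od (k - 1 - e) hs
  obtain ⟨ho0, hok⟩ := hob o ho
  obtain ⟨idx, hidx, ho_eq⟩ := List.getElem_of_mem ho
  simp only [pvCand]
  by_cases hcase : o ≤ k - 1 - e
  · -- o fits without wrap: the predecessor of bisectRight dominates it
    have hidxlt : idx < PySem.List.bisectRight od (k - 1 - e) := by
      by_contra h
      rw [not_lt] at h
      have := hhi idx hidx h
      omega
    have hipos : 0 < PySem.List.bisectRight od (k - 1 - e) := by omega
    have hi1 : PySem.List.bisectRight od (k - 1 - e) - 1 < od.length := by omega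
    have hle : o ≤ od[PySem.List.bisectRight od (k - 1 - e) - 1] := by
      rcases Nat.lt_or_ge idx (PySem.List.bisectRight od (k - 1 - e) - 1) with h | h
      · have := List.pairwise_iff_getElem.mp hs idx _ hidx hi1 h
        omega
      · have hidx_eq : idx = PySem.List.bisectRight od (k - 1 - e) - 1 := by omega
        subst hidx_eq
        omega
    rw [if_pos hipos, List.getD_eq_getElem od 0 hi1,
        pv_mod_id hk (by omega) (by omega)]
    omega
  · rw [not_le] at hcase
    have hmo_ge : o ≤ mo := pv_getLast_ge hs hmo o ho
    obtain ⟨hmo0, hmok⟩ := hob mo (List.mem_of_getLast? hmo)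
    have hwrap : PySem.Int.mod (e + o) k = e + o - k := pv_mod_wrap hk (by omega) (by omega)
    by_cases hipos : 0 < PySem.List.bisectRight od (k - 1 - e)
    · have hi1 : PySem.List.bisectRight od (k - 1 - e) - 1 < od.length := by omega
      rw [if_pos hipos, List.getD_eq_getElem od 0 hi1]
      have h0 : 0 ≤ od[PySem.List.bisectRight od (k - 1 - e) - 1] :=
        (hob _ (List.getElem_mem hi1)).1
      omega
    · rw [if_neg hipos]
      have hwrap2 : PySem.Int.mod (e + mo) k = e + mo - k := pv_mod_wrap hk (by omega) (by omega)
      omega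

-- every candidate is one of the pair remainders
lemma pvCand_mem (A : List Int) (k mo e : Int) (hk : 0 < k)
    (he : e ∈ pvEv A k) (hmo : (pvOd A k).getLast? = some mo) :
    pvCand (pvOd A k) k mo e ∈ pvPairs A k := by
  obtain ⟨a, haA, ha2, rfl⟩ := pv_mem_pvEv.mp he
  obtain ⟨hble, hlo, hhi⟩ :=
    PySem.List.bisectRight_spec (pvOd A k) (k - 1 - PySem.Int.mod a k) (pv_pvOd_sorted A k)
  have he0 := PySem.Int.mod_nonneg a hk
  have hek := PySem.Int.mod_lt a hk
  simp only [pvCand]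
  by_cases hipos : 0 < PySem.List.bisectRight (pvOd A k) (k - 1 - PySem.Int.mod a k)
  · have hi1 : PySem.List.bisectRight (pvOd A k) (k - 1 - PySem.Int.mod a k) - 1 < (pvOd A k).length := by omega
    rw [if_pos hipos, List.getD_eq_getElem _ 0 hi1]
    obtain ⟨b, hbA, hb2, hbeq⟩ := pv_mem_pvOd.mp (List.getElem_mem hi1)
    have hub := hlo _ hi1 (by omega)
    have hb0 : 0 ≤ (pvOd A k)[PySem.List.bisectRight (pvOd A k) (k - 1 - PySem.Int.mod a k) - 1] := by
      rw [hbeq]; exact PySem.Int.mod_nonneg b hk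
    refine pv_mem_pvPairs.mpr ⟨a, haA, ha2, b, hbA, hb2, ?_⟩
    have hmid : PySem.Int.mod (a + b) k
        = PySem.Int.mod (PySem.Int.mod a k + (pvOd A k)[PySem.List.bisectRight (pvOd A k) (k - 1 - PySem.Int.mod a k) - 1]) k := by
      rw [pv_mod_add a b k hk, hbeq]
    rw [hmid]
    exact (pv_mod_id hk (by omega) (by omega)).symm
  · rw [if_neg hipos]
    obtain ⟨b, hbA, hb2, hbeq⟩ := pv_mem_pvOd.mp (List.mem_of_getLast? hmo)
    refine pv_mem_pvPairs.mpr ⟨a, haA, ha2, b, hbA, hb2, ?_⟩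
    rw [pv_mod_add a b k hk, hbeq]

-- ===== VERDICT (by name: the statement is the Claim_ definition above) =====
-- bounds for the odd residues
lemma pv_pvOd_bounds {A : List Int} {k : Int} (hk : 0 < k) :
    ∀ x ∈ pvOd A k, 0 ≤ x ∧ x < k := by
  intro x hx
  obtain ⟨b, _, _, rfl⟩ := pv_mem_pvOd.mp hx
  exact ⟨PySem.Int.mod_nonneg b hk, PySem.Int.mod_lt b hk⟩

theorem find_maximum_remainder_spec : Claim_equal_find_maximum_remainder := by
  intro N A k _ hpre
  unfold Spec_find_maximum_remainder
  rw [pvA_eq]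
  by_cases hk : k < 0
  · -- negative k: every remainder is ≤ 0, both sides are 0
    have hB : find_maximum_remainder_alt N A k = 0 := by
      unfold find_maximum_remainder_alt
      rw [if_pos hk]
    rw [hB]
    apply pv_fm_le
    intro x hx
    obtain ⟨a, _, _, b, _, _, rfl⟩ := pv_mem_pvPairs.mp hx
    exact (PySem.Int.mod_neg_bounds (a + b) hk).2
  · have hk' : 0 < k := by
      rcases lt_trichotomy k 0 with h | h | h
      · exact absurd h hk
      · exact absurd h hpre
      · exact h
    rw [pvB_eq N A k hk]
    cases hlast : (pvOd A k).getLast? with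
    | none =>
      -- no odd element: the pair list is empty and both sides are 0
      have hod : pvOd A k = [] := List.getLast?_eq_none_iff.mp hlast
      have hof : PySem.Set.ofList ((A.filter (fun x => PySem.Int.mod x 2 == 1)).map (fun x => PySem.Int.mod x k)) = [] := by
        exact (PySem.List.sorted_eq_nil_iff _ _ _).mp hod
      have hmap : (A.filter (fun x => PySem.Int.mod x 2 == 1)).map (fun x => PySem.Int.mod x k) = [] := by
        by_contra h
        obtain ⟨y, hy⟩ := List.exists_mem_of_ne_nil _ h
        have : y ∈ PySem.Set.ofList ((A.filter (fun x => PySem.Int.mod x 2 == 1)).map (fun x => PySem.Int.mod x k)) :=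
          (PySem.Set.mem_ofList _ _).mpr hy
        rw [hof] at this
        cases this
      have hfil : A.filter (fun x => PySem.Int.mod x 2 == 1) = [] := List.map_eq_nil_iff.mp hmap
      have hpairs : pvPairs A k = [] := by
        unfold pvPairs
        rw [hfil]
        simp
      rw [hpairs]
      rfl
    | some mo =>
      have hred : (match some mo with
         | none => (0:Int)
         | some mo =>
          ((pvEv A k).foldl (fun (s : Int × Nat) e =>
              let j := pvDropGt (pvOd A k) (k - 1 - e) s.2
              let cand := if 0 < j then e + PySem.List.pyGetD (pvOd A k) ((j : Int) - 1) 0 else PySem.Int.mod (e + mo) k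
              (if cand > s.1 then cand else s.1, j)) (0, (pvOd A k).length)).1)
        = ((pvEv A k).foldl (fun (s : Int × Nat) e =>
              let j := pvDropGt (pvOd A k) (k - 1 - e) s.2
              let cand := if 0 < j then e + PySem.List.pyGetD (pvOd A k) ((j : Int) - 1) 0 else PySem.Int.mod (e + mo) k
              (if cand > s.1 then cand else s.1, j)) (0, (pvOd A k).length)).1 := rfl
      rw [hred]
      rw [pvB_fold (pvOd A k) k mo (pv_pvOd_sorted A k) (pvEv A k) (pv_pvEv_sorted A k)
            (pvOd A k).length 0 (Nat.le_refl _) (fun idx h hge => absurd h (not_lt.mpr hge))]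
      rw [← List.foldl_map (f := pvCand (pvOd A k) k mo) (g := max)]
      apply pv_fm_eq
      · -- every pair remainder is dominated by the candidate of its even residue
        intro x hx
        obtain ⟨a, haA, ha2, b, hbA, hb2, rfl⟩ := pv_mem_pvPairs.mp hx
        have he : PySem.Int.mod a k ∈ pvEv A k := pv_mem_pvEv.mpr ⟨a, haA, ha2, rfl⟩
        have ho : PySem.Int.mod b k ∈ pvOd A k := pv_mem_pvOd.mpr ⟨b, hbA, hb2, rfl⟩
        have hdom : PySem.Int.mod (a + b) k ≤ pvCand (pvOd A k) k mo (PySem.Int.mod a k) := by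
          rw [pv_mod_add a b k hk']
          exact pvCand_ge (pvOd A k) k mo (PySem.Int.mod a k) (PySem.Int.mod b k)
            (pv_pvOd_sorted A k) hk' (PySem.Int.mod_nonneg a hk') (PySem.Int.mod_lt a hk')
            (pv_pvOd_bounds hk') ho hlast
        exact le_trans hdom (pv_fm_mem (List.mem_map_of_mem he) 0)
      · -- every candidate is one of the pair remainders
        intro c hc
        obtain ⟨e, he, rfl⟩ := List.mem_map.mp hc
        exact pv_fm_mem (pvCand_mem A k mo e hk' he hlast) 0
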